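-- pv_equiv track=rewrite | github.com/Martar189/python-for-data-science | 01-python-refresher/solutions/06-div-by.py | div_by
-- ===== SOURCE A (Python) =====
-- def div_by(upper_limit, divisors):
--     """
--     Returns a list of the numbers between 1 and a given upper limit that are
--     divisible by at least one element of a given list of divisors.
--     """
--     result = []
--     for i in range(1, upper_limit + 1):
--         for divisor in divisors:
--             if i % divisor == 0:
--                 result.append(i)
--                 break
--     return result
-- ===== SOURCE B (Python) =====
-- def div_by(upper_limit, divisors):
--     """
--     Returns a list of the numbers between 1 and a given upper limit that are
--     divisible by at least one element of a given list of divisors.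
--
--     Sieve: mark the multiples of each divisor in a boolean array, then
--     collect the marked numbers.
--     """
--     n = upper_limit if upper_limit > 0 else 0
--     marked = [False] * (n + 1)
--     for d in divisors:
--         step = abs(d)
--         if step > 0:
--             for m in range(step, n + 1, step):
--                 marked[m] = True
--     return [i for i in range(1, n + 1) if marked[i]]
-- ===== Notes on version B (the rewrite author's own statement) =====
-- stated objective: faster
-- what changed: Replaces the per-number scan over all divisors (with break) by a sieve that marks the multiples of each divisor in a boolean array and then collects the marked numbers.
-- outside the precondition, e.g. on div_by(5, [1, 0]): A returns [1, 2, 3, 4, 5], B returns [1, 2, 3, 4, 5]; on div_by(3, [0]): A raises ZeroDivisionError, B returns []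
import Mathlib
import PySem

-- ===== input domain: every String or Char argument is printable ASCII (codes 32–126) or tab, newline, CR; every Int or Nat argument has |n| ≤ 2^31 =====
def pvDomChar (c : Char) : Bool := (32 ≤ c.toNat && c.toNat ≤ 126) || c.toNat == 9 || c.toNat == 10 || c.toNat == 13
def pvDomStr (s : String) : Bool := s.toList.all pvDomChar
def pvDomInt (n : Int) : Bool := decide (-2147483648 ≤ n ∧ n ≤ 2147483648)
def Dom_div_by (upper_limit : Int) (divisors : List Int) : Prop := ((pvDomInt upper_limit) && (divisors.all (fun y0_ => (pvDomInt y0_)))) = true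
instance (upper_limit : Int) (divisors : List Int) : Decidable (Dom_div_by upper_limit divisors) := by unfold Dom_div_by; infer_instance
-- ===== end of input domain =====

-- B replaces A's per-number scan over all divisors by a sieve that marks the
-- multiples of each divisor in a boolean array (objective: faster, asymptotically).


-- ===== PORT A =====
-- inner 'for divisor in divisors: if i % divisor == 0: result.append(i); break'
def divByInner (i : Int) (res : List Int) : List Int → List Int
  | [] => res
  | d :: ds => if PySem.Int.mod i d == 0 then res ++ [i] else divByInner i res ds

def div_by (upper_limit : Int) (divisors : List Int) : List Int :=
  (PySem.List.pyRange 1 (upper_limit + 1) 1).foldl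
    (fun res i => divByInner i res divisors) []

-- ===== PORT B =====
-- sieve from Source B; marked[m] = True is List.set (index m is always in range),
-- marked[i] in the final comprehension is read with getD (index i is always in range)
def div_by_alt (upper_limit : Int) (divisors : List Int) : List Int :=
  let n : Int := if upper_limit > 0 then upper_limit else 0
  let marked : List Bool :=
    divisors.foldl
      (fun marked d =>
        let step := |d|
        if 0 < step then
          (PySem.List.pyRange step (n + 1) step).foldl
            (fun marked m => marked.set m.toNat true) marked
        else marked)
      (List.replicate (n.toNat + 1) false)
  (PySem.List.pyRange 1 (n + 1) 1).filter (fun i => marked.getD i.toNat false)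

-- ===== PRECONDITION & SPEC =====
-- Pre_ excludes inputs with 0 among the divisors and upper_limit ≥ 1: there A may
-- raise ZeroDivisionError (it raises iff some i in 1..n is divided by no divisor
-- preceding the 0; when it does return, its value agrees with B's).
def Pre_div_by (upper_limit : Int) (divisors : List Int) : Prop :=
  upper_limit < 1 ∨ (0 : Int) ∉ divisors
instance (upper_limit : Int) (divisors : List Int) : Decidable (Pre_div_by upper_limit divisors) := by unfold Pre_div_by; infer_instance

def pvWitness_div_by : Int × List Int := (10, [2, 3])

def Spec_div_by (upper_limit : Int) (divisors : List Int) (out : List Int) : Prop := out = div_by_alt upper_limit divisors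
instance (upper_limit : Int) (divisors : List Int) (out : List Int) : Decidable (Spec_div_by upper_limit divisors out) := by unfold Spec_div_by; infer_instance

-- ===== CLAIM (what is proved, stated in full; the proofs are below) =====
def Claim_equal_div_by : Prop := ∀ (upper_limit : Int) (divisors : List Int), Dom_div_by upper_limit divisors → Pre_div_by upper_limit divisors → Spec_div_by upper_limit divisors (div_by upper_limit divisors)

-- ===== LEMMAS AND PROOFS =====

-- the inner loop's value: append i iff some divisor divides it
theorem divByInner_eq (i : Int) (res : List Int) (ds : List Int) :
    divByInner i res ds =
      if ds.any (fun d => PySem.Int.mod i d == 0) then res ++ [i] else res := by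
  induction ds with
  | nil => simp [divByInner]
  | cons d ds ih =>
      by_cases h : PySem.Int.mod i d == 0 <;> simp [divByInner, h, ih]

theorem div_by_eq_filter (u : Int) (ds : List Int) :
    div_by u ds =
      (PySem.List.pyRange 1 (u + 1) 1).filter
        (fun i => ds.any (fun d => PySem.Int.mod i d == 0)) := by
  unfold div_by
  have h : (fun (res : List Int) (i : Int) => divByInner i res ds)
      = (fun res i => if ds.any (fun d => PySem.Int.mod i d == 0) then res ++ [i] else res) := by
    funext res i; exact divByInner_eq i res ds
  rw [h, PySem.List.foldl_append_if_eq_filter]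
  simp

theorem length_foldl_set (ms : List Int) (l : List Bool) :
    (ms.foldl (fun l m => l.set m.toNat true) l).length = l.length := by
  induction ms generalizing l with
  | nil => rfl
  | cons m ms ih => simp [List.foldl_cons, ih]

theorem getD_foldl_set (ms : List Int) (l : List Bool) (j : Nat) (hj : j < l.length) :
    (ms.foldl (fun l m => l.set m.toNat true) l).getD j false
      = (l.getD j false || ms.any (fun m => m.toNat == j)) := by
  induction ms generalizing l with
  | nil => simp
  | cons m ms ih =>
      rw [List.foldl_cons, ih _ (by simpa using hj)]
      have hset : (l.set m.toNat true).getD j false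
          = ((m.toNat == j) || l.getD j false) := by
        rw [List.getD_eq_getElem?_getD, List.getD_eq_getElem?_getD, List.getElem?_set]
        by_cases h : m.toNat = j <;> simp [h, hj]
      rw [hset]
      cases l.getD j false <;> cases hmj : (m.toNat == j) <;> simp [List.any_cons, hmj]

theorem getD_marked (n : Int) (divisors : List Int) (l : List Bool) (j : Nat) (hj : j < l.length) :
    (divisors.foldl
        (fun marked d =>
          let step := |d|
          if 0 < step then
            (PySem.List.pyRange step (n + 1) step).foldl
              (fun marked m => marked.set m.toNat true) marked
          else marked) l).getD j false
      = (l.getD j false ||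
          divisors.any (fun d =>
            0 < |d| && (PySem.List.pyRange |d| (n + 1) |d|).any (fun m => m.toNat == j))) := by
  induction divisors generalizing l with
  | nil => simp
  | cons d ds ih =>
      rw [List.foldl_cons]
      by_cases hd : 0 < |d|
      · simp only [hd, if_pos]
        rw [ih _ (by rw [length_foldl_set]; exact hj),
            getD_foldl_set _ _ _ hj, List.any_cons,
            decide_eq_true hd, Bool.true_and, Bool.or_assoc]
      · simp only [hd, if_neg, not_false_eq_true]
        rw [ih _ hj, List.any_cons, decide_eq_false hd, Bool.false_and, Bool.false_or]

-- the sieve test for one divisor equals Python's i % d == 0, for 1 ≤ i ≤ n, d ≠ 0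
theorem sieve_test_eq (n i d : Int) (hi1 : 1 ≤ i) (hin : i < n + 1) (hd : d ≠ 0) :
    (0 < |d| && (PySem.List.pyRange |d| (n + 1) |d|).any (fun m => m.toNat == i.toNat))
      = (PySem.Int.mod i d == 0) := by
  have hstep : (0 : Int) < |d| := abs_pos.mpr hd
  rw [Bool.eq_iff_iff]
  simp only [Bool.and_eq_true, List.any_eq_true, beq_iff_eq, decide_eq_true_eq]
  constructor
  · rintro ⟨-, m, hm, hmj⟩
    rw [PySem.List.mem_pyRange_iff_of_pos hstep] at hm
    obtain ⟨hm1, hm2, hm3⟩ := hm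
    have hm0 : 0 < m := lt_of_lt_of_le hstep hm1
    have hmi : m = i := by omega
    rw [PySem.Int.mod_eq_zero_iff_dvd]
    have hdm : |d| ∣ m := by simpa using dvd_add hm3 (dvd_refl |d|)
    exact (abs_dvd d i).mp (hmi ▸ hdm)
  · intro hmod
    rw [PySem.Int.mod_eq_zero_iff_dvd] at hmod
    have hdvd : |d| ∣ i := (abs_dvd d i).mpr hmod
    refine ⟨hstep, i, ?_, by omega⟩
    rw [PySem.List.mem_pyRange_iff_of_pos hstep]
    exact ⟨Int.le_of_dvd (by omega) hdvd, hin, (dvd_sub_right hdvd).mpr dvd_rfl⟩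

theorem any_congr_mem {A : Type} (l : List A) (p q : A → Bool)
    (h : ∀ x ∈ l, p x = q x) : l.any p = l.any q := by
  induction l with
  | nil => rfl
  | cons a l ih =>
      rw [List.any_cons, List.any_cons, h a (List.mem_cons_self),
          ih (fun x hx => h x (List.mem_cons_of_mem a hx))]

-- ===== VERDICT (by name: the statement is the Claim_ definition above) =====
theorem div_by_spec : Claim_equal_div_by := by
  intro u ds _ hpre
  unfold Spec_div_by
  rw [div_by_eq_filter]
  unfold div_by_alt
  by_cases hu : 1 ≤ u
  · have hpos : u > 0 := by omega
    have hz : (0 : Int) ∉ ds := by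
      cases hpre with
      | inl h => omega
      | inr h => exact h
    simp only [hpos, if_pos]
    refine (List.filter_congr ?_).symm
    intro i hi
    rw [PySem.List.mem_pyRange_one] at hi
    have hjlt : i.toNat < (List.replicate (u.toNat + 1) false).length := by
      simp [List.length_replicate]; omega
    rw [getD_marked u ds _ _ hjlt]
    have hrep : (List.replicate (u.toNat + 1) false).getD i.toNat false = false := by
      rw [List.getD_eq_getElem?_getD, List.getElem?_replicate]
      split <;> rfl
    rw [hrep, Bool.false_or]
    refine any_congr_mem ds _ _ ?_
    intro d hd
    exact sieve_test_eq u i d hi.1 hi.2 (by rintro rfl; exact hz hd)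
  · have h1 : PySem.List.pyRange 1 (u + 1) 1 = [] :=
      PySem.List.pyRange_one_eq_nil (by omega)
    have hpos : ¬ u > 0 := by omega
    simp [h1, hpos]
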